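-- pv_equiv track=rewrite | github.com/kevin33335313/ai-smart-meeting-notes-assistant | backend/app/services/poster_iteration_service.py | _make_less_dramatic
-- ===== SOURCE A (Python) =====
-- def _make_less_dramatic(prompt: str) -> str:
--     """減少戲劇性，使其更柔和"""
--
--     dramatic_replacements = {
--         "dramatic lighting": "soft studio light",
--         "chiaroscuro": "even illumination",
--         "high contrast": "balanced lighting",
--         "strong shadows": "subtle shadows",
--         "dramatic accent lighting": "natural daylight"
--     }
--
--     modified_prompt = prompt
--     for old, new in dramatic_replacements.items():
--         modified_prompt = modified_prompt.replace(old, new)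
--
--     return modified_prompt
-- ===== SOURCE B (Python) =====
-- def _make_less_dramatic(prompt: str) -> str:
--     """減少戲劇性，使其更柔和 — recursive fold over the table, split/join per phrase"""
--
--     replacements = [
--         ("dramatic lighting", "soft studio light"),
--         ("chiaroscuro", "even illumination"),
--         ("high contrast", "balanced lighting"),
--         ("strong shadows", "subtle shadows"),
--         ("dramatic accent lighting", "natural daylight"),
--     ]
--
--     def soften(s, reps):
--         if not reps:
--             return s
--         old, new = reps[0]
--         return soften(new.join(s.split(old)), reps[1:])
--
--     return soften(prompt, replacements)
-- ===== Notes on version B (the rewrite author's own statement) =====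
-- stated objective: alternative
-- what changed: B replaces the imperative loop of str.replace passes by a recursive fold over the replacement table that rewrites each phrase with the split/join idiom (new.join(s.split(old))) instead of str.replace.
import Mathlib
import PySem

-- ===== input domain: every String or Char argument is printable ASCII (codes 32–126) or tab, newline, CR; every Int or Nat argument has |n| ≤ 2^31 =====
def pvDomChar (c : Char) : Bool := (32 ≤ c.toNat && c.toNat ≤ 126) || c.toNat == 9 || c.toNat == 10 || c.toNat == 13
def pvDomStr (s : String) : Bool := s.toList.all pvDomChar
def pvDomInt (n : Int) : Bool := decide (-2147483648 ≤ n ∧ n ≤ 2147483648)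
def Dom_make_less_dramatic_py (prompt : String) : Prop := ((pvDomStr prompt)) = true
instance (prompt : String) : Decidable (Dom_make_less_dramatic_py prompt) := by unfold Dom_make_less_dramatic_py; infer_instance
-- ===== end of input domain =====

-- B folds the replacement table recursively and rewrites each phrase with the split/join
-- idiom instead of A's imperative loop of str.replace passes; same value on every input.

-- ===== PORT A =====
-- literal transliteration of A: build the dict (association list, insertion order),
-- then fold the five str.replace passes over it in order.
def make_less_dramatic_py (prompt : String) : String :=
  let dramatic_replacements : List (String × String) :=
    [("dramatic lighting", "soft studio light"),
     ("chiaroscuro", "even illumination"),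
     ("high contrast", "balanced lighting"),
     ("strong shadows", "subtle shadows"),
     ("dramatic accent lighting", "natural daylight")]
  dramatic_replacements.foldl
    (fun modified_prompt p => PySem.Str.replace modified_prompt p.1 p.2) prompt

-- ===== PORT B =====
-- Source B's recursive helper soften(s, reps): done → s, else rewrite the first phrase by
-- split-then-join (new.join(s.split(old)); Chars.splitOn is exact for a non-empty
-- separator, and every table key is non-empty) and recurse on the rest of the table.
def pvSoften : String → List (String × String) → String
  | s, [] => s
  | s, kv :: reps =>
      pvSoften
        (String.ofList (PySem.Chars.join kv.2.toList (PySem.Chars.splitOn s.toList kv.1.toList)))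
        reps

def make_less_dramatic_py_alt (prompt : String) : String :=
  pvSoften prompt
    [("dramatic lighting", "soft studio light"),
     ("chiaroscuro", "even illumination"),
     ("high contrast", "balanced lighting"),
     ("strong shadows", "subtle shadows"),
     ("dramatic accent lighting", "natural daylight")]

-- ===== PRECONDITION & SPEC =====
def Spec_make_less_dramatic_py (prompt : String) (out : String) : Prop :=
  out = make_less_dramatic_py_alt prompt
instance (prompt : String) (out : String) : Decidable (Spec_make_less_dramatic_py prompt out) := by
  unfold Spec_make_less_dramatic_py; infer_instance

-- ===== CLAIM (what is proved, stated in full; the proofs are below) =====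
def Claim_equal_make_less_dramatic_py : Prop := ∀ (prompt : String), Dom_make_less_dramatic_py prompt → Spec_make_less_dramatic_py prompt (make_less_dramatic_py prompt)

-- ===== LEMMAS AND PROOFS =====

-- ---- a fueled version of Python's str.replace (leftmost, non-overlapping) ----
def pvRepGo (old new : List Char) : Nat → List Char → List Char
  | 0, l => l
  | _ + 1, [] => []
  | fuel + 1, c :: t =>
    if old.isPrefixOf (c :: t) then new ++ pvRepGo old new fuel ((c :: t).drop old.length)
    else c :: pvRepGo old new fuel t

def pvRep (old new l : List Char) : List Char := pvRepGo old new l.length l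

theorem pvRepGo_nil (old new : List Char) (f : Nat) : pvRepGo old new f [] = [] := by
  cases f <;> rfl

theorem pvRepGo_congr (old new : List Char) (ho : old ≠ []) :
    ∀ f g l, l.length ≤ f → l.length ≤ g → pvRepGo old new f l = pvRepGo old new g l := by
  intro f
  induction f with
  | zero =>
    intro g l hf _
    have : l = [] := List.eq_nil_of_length_eq_zero (Nat.le_zero.mp hf)
    subst this; simp [pvRepGo_nil]
  | succ f ih =>
    intro g l hf hg
    cases l with
    | nil => simp [pvRepGo_nil]
    | cons c t =>
      cases g with
      | zero => simp at hg
      | succ g =>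
        have hol : 1 ≤ old.length := by
          cases old with
          | nil => exact absurd rfl ho
          | cons _ _ => simp
        simp only [List.length_cons] at hf hg
        simp only [pvRepGo]
        split
        · have hd : ((c :: t).drop old.length).length ≤ f := by
            simp only [List.length_drop, List.length_cons]
            omega
          have hd' : ((c :: t).drop old.length).length ≤ g := by
            simp only [List.length_drop, List.length_cons]
            omega
          rw [ih g _ hd hd']
        · have h1 : t.length ≤ f := by simpa using hf
          have h2 : t.length ≤ g := by simpa using hg
          rw [ih g _ h1 h2]

theorem pvRep_nil (old new : List Char) : pvRep old new [] = [] := rfl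

theorem pvRep_pos (old new : List Char) (ho : old ≠ []) (c : Char) (t : List Char)
    (h : old.isPrefixOf (c :: t) = true) :
    pvRep old new (c :: t) = new ++ pvRep old new ((c :: t).drop old.length) := by
  have hol : 1 ≤ old.length := by
    cases old with
    | nil => exact absurd rfl ho
    | cons _ _ => simp
  show pvRepGo old new (t.length + 1) (c :: t) = _
  simp only [pvRepGo, h, if_pos]
  congr 1
  exact pvRepGo_congr old new ho _ _ _
    (by simp only [List.length_drop, List.length_cons]; omega) le_rfl

theorem pvRep_neg (old new : List Char) (_ho : old ≠ []) (c : Char) (t : List Char)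
    (h : old.isPrefixOf (c :: t) = false) :
    pvRep old new (c :: t) = c :: pvRep old new t := by
  show pvRepGo old new (t.length + 1) (c :: t) = _
  simp only [pvRepGo, h, if_false, Bool.false_eq_true]
  rfl

-- PySem's replace (for a non-empty pattern) IS pvRep
theorem pv_go_eq (old new : List Char) (ho : old ≠ []) :
    ∀ f l acc, l.length ≤ f →
      PySem.Chars.replace.go old new f l acc = acc.reverse ++ pvRep old new l := by
  intro f
  induction f with
  | zero =>
    intro l acc hf
    have : l = [] := List.eq_nil_of_length_eq_zero (Nat.le_zero.mp hf)
    subst this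
    rw [PySem.Chars.replace.go.eq_def]
    simp [pvRep_nil]
  | succ f ih =>
    intro l acc hf
    cases l with
    | nil =>
      rw [PySem.Chars.replace.go.eq_def]
      simp [pvRep_nil]
    | cons c t =>
      have hol : 1 ≤ old.length := by
        cases old with
        | nil => exact absurd rfl ho
        | cons _ _ => simp
      rw [PySem.Chars.replace.go.eq_def]
      simp only []
      simp only [List.length_cons] at hf
      by_cases h : old.isPrefixOf (c :: t) = true
      · rw [if_pos h, ih _ _ (by simp only [List.length_drop, List.length_cons]; omega)]
        rw [pvRep_pos old new ho c t h]
        simp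
      · rw [if_neg h, ih _ _ (by omega)]
        rw [pvRep_neg old new ho c t (Bool.not_eq_true _ ▸ eq_false_of_ne_true h)]
        simp
theorem pv_replace_eq (s old new : List Char) (ho : old ≠ []) :
    PySem.Chars.replace s old new = pvRep old new s := by
  unfold PySem.Chars.replace
  rw [if_neg (by simpa using ho)]
  rw [pv_go_eq old new ho _ _ _ le_rfl]
  simp


-- ---- intercalate helpers ----
theorem pvIntercalateCons₂ (sep w : List Char) (Z : List (List Char)) (hZ : Z ≠ []) :
    sep.intercalate (w :: Z) = w ++ sep ++ sep.intercalate Z := by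
  cases Z with
  | nil => exact absurd rfl hZ
  | cons z Z' =>
    simp [List.intercalate, List.intersperse]

theorem pvIntercalateLast (sep : List Char) :
    ∀ (W : List (List Char)) (y : List Char),
      sep.intercalate (W ++ [y]) = (if W = [] then [] else sep.intercalate W ++ sep) ++ y := by
  intro W
  induction W with
  | nil => intro y; simp [List.intercalate]
  | cons w W' ih =>
    intro y
    rw [List.cons_append, pvIntercalateCons₂ sep w (W' ++ [y]) (by simp)]
    cases hW : W' with
    | nil => simp [List.intercalate]
    | cons a b =>
      rw [← hW, ih y, if_neg (by simp [hW]), pvIntercalateCons₂ sep w W' (by simp [hW]),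
        if_neg (by simp)]
      simp [List.append_assoc]

-- ---- join ∘ splitOn = replace (for a non-empty separator) ----
theorem pvSplitGo (old new : List Char) (ho : old ≠ []) :
    ∀ fuel l cur acc, l.length < fuel →
      new.intercalate (PySem.Chars.splitOn.go old fuel l cur acc)
        = new.intercalate (acc.reverse ++ [cur.reverse]) ++ pvRep old new l := by
  have hol : 1 ≤ old.length := by
    cases old with
    | nil => exact absurd rfl ho
    | cons _ _ => simp
  intro fuel
  induction fuel with
  | zero => intro l cur acc h; omega
  | succ fuel ih =>
    intro l cur acc h
    cases l with
    | nil =>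
      rw [PySem.Chars.splitOn.go.eq_def]
      simp [pvRep_nil]
    | cons c rest =>
      simp only [List.length_cons] at h
      rw [PySem.Chars.splitOn.go.eq_def]
      simp only []
      by_cases hp : old.isPrefixOf (c :: rest) = true
      · rw [if_pos hp,
          ih _ _ _ (by simp only [List.length_drop, List.length_cons]; omega)]
        rw [pvRep_pos old new ho c rest hp]
        rw [List.reverse_cons,
          show ([] : List Char).reverse = [] from rfl,
          pvIntercalateLast new (acc.reverse ++ [cur.reverse]) [],
          if_neg (by simp)]
        simp [List.append_assoc]
      · rw [if_neg hp,
          ih _ _ _ (by omega)]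
        rw [pvRep_neg old new ho c rest (Bool.not_eq_true _ ▸ eq_false_of_ne_true hp)]
        rw [List.reverse_cons,
          pvIntercalateLast new acc.reverse (cur.reverse ++ [c]),
          pvIntercalateLast new acc.reverse cur.reverse]
        simp [List.append_assoc]

theorem pvJoinSplit (s old new : List Char) (ho : old ≠ []) :
    PySem.Chars.join new (PySem.Chars.splitOn s old) = PySem.Chars.replace s old new := by
  unfold PySem.Chars.join PySem.Chars.splitOn
  rw [pvSplitGo old new ho (s.length + 1) s [] [] (by omega)]
  rw [pv_replace_eq s old new ho]
  simp [List.intercalate]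

-- one pass of Source B (new.join(s.split(old))) is one str.replace pass
theorem pvPass (s old new : String) (ho : old.toList ≠ []) :
    String.ofList (PySem.Chars.join new.toList (PySem.Chars.splitOn s.toList old.toList))
      = PySem.Str.replace s old new := by
  rw [pvJoinSplit _ _ _ ho]
  rfl

-- ===== VERDICT (by name: the statement is the Claim_ definition above) =====
theorem make_less_dramatic_py_spec : Claim_equal_make_less_dramatic_py := by
  intro prompt _
  unfold Spec_make_less_dramatic_py
  simp only [make_less_dramatic_py, make_less_dramatic_py_alt, List.foldl, pvSoften]
  rw [pvPass _ _ _ (by decide), pvPass _ _ _ (by decide), pvPass _ _ _ (by decide),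
    pvPass _ _ _ (by decide), pvPass _ _ _ (by decide)]
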